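-- pv_equiv track=rewrite | github.com/ZenoAFfectionate/WhaleCode | code/tools/builtin/_code_utils.py | _common_indent
-- ===== SOURCE A (Python) =====
-- from typing import Callable, Iterable, List, Optional, Sequence, Tuple
--
-- def _leading_whitespace(line: str) -> str:
--     return line[: len(line) - len(line.lstrip(" \t"))]
--
-- def _common_indent(lines: Sequence[str]) -> str:
--     non_empty = [line for line in lines if line.strip()]
--     if not non_empty:
--         return ""
--     indents = [_leading_whitespace(line) for line in non_empty]
--     indent = indents[0]
--     for item in indents[1:]:
--         max_prefix = min(len(indent), len(item))
--         common_length = 0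
--         while common_length < max_prefix and indent[common_length] == item[common_length]:
--             common_length += 1
--         indent = indent[:common_length]
--         if not indent:
--             break
--     return indent
-- ===== SOURCE B (Python) =====
-- def _common_indent(lines):
--     indents = []
--     for line in lines:
--         if line.strip():
--             i = 0
--             while i < len(line) and line[i] in " \t":
--                 i += 1
--             indents.append(line[:i])
--     if not indents:
--         return ""
--     lo, hi = min(indents), max(indents)
--     prefix = []
--     for a, b in zip(lo, hi):
--         if a != b:
--             break
--         prefix.append(a)
--     return "".join(prefix)
-- ===== Notes on version B (the rewrite author's own statement) =====
-- stated objective: alternative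
-- what changed: Instead of folding a pairwise common-prefix over every indent, B takes only the lexicographic min and max of the indent list and returns the common prefix of those two endpoints (which equals the common prefix of all).
import Mathlib
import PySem

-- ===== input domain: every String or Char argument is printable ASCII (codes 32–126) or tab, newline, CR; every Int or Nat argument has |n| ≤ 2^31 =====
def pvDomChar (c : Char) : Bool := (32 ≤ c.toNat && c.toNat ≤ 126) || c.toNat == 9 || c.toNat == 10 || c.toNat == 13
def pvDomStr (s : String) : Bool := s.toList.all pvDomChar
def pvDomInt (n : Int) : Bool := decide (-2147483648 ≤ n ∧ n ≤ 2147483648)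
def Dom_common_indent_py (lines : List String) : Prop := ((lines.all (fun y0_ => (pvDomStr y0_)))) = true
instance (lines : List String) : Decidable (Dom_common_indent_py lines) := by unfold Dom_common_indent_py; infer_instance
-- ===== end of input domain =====

-- B computes the common indent as the character-by-character common prefix of only the
-- lexicographic min and max of the indent list, instead of A's pairwise prefix fold
-- over all indents (objective: alternative; same asymptotic cost).

-- ===== PORT A =====
-- _leading_whitespace: line[:len(line) - len(line.lstrip(" \t"))]; the slice bound k
-- satisfies 0 ≤ k ≤ len(line), so line[:k] is exactly List.take k.
def pvLeadWS (cs : List Char) : List Char :=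
  cs.take (cs.length - (cs.dropWhile (fun c => c == ' ' || c == '\t')).length)

-- the inner 'while common_length < max_prefix and indent[k] == item[k]' counting loop
def pvCommonLen : List Char → List Char → Nat
  | x :: xs, y :: ys => if x = y then pvCommonLen xs ys + 1 else 0
  | _, _ => 0

-- the 'for item in indents[1:]' loop with its early 'break' when indent becomes empty
def pvLoopA (indent : List Char) : List (List Char) → List Char
  | [] => indent
  | item :: rest =>
      let indent' := indent.take (pvCommonLen indent item)
      if indent' = [] then indent' else pvLoopA indent' rest

def common_indent_py (lines : List String) : String :=
  let nonEmpty := lines.filter (fun l => !(PySem.Chars.strip l.toList == []))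
  match nonEmpty.map (fun l => pvLeadWS l.toList) with
  | [] => ""                                   -- 'if not non_empty: return ""'
  | ind0 :: rest => String.mk (pvLoopA ind0 rest)

-- ===== PORT B =====
-- B's index loop collecting the leading ' '/'\t' characters of a line
def pvTakeWS (cs : List Char) : List Char :=
  cs.takeWhile (fun c => c == ' ' || c == '\t')

-- B's zip-and-break loop building the common prefix of the two endpoint strings
def pvCp2 : List Char → List Char → List Char
  | x :: xs, y :: ys => if x = y then x :: pvCp2 xs ys else []
  | _, _ => []

def common_indent_py_alt (lines : List String) : String :=
  let indents := (lines.filter (fun l => !(PySem.Chars.strip l.toList == []))).map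
    (fun l => pvTakeWS l.toList)
  match PySem.List.min? indents (fun x => x), PySem.List.max? indents (fun x => x) with
  | some lo, some hi => String.mk (pvCp2 lo hi)
  | _, _ => ""

-- ===== PRECONDITION & SPEC =====
def Spec_common_indent_py (lines : List String) (out : String) : Prop := out = common_indent_py_alt lines
instance (lines : List String) (out : String) : Decidable (Spec_common_indent_py lines out) := by unfold Spec_common_indent_py; infer_instance

-- ===== CLAIM (what is proved, stated in full; the proofs are below) =====
def Claim_equal_common_indent_py : Prop := ∀ (lines : List String), Dom_common_indent_py lines → Spec_common_indent_py lines (common_indent_py lines)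

-- ===== LEMMAS AND PROOFS =====

-- A's arithmetic leading-whitespace extraction equals B's takeWhile
theorem pvLeadWS_eq (cs : List Char) : pvLeadWS cs = pvTakeWS cs := by
  unfold pvLeadWS pvTakeWS
  induction cs with
  | nil => rfl
  | cons c t ih =>
    by_cases h : (c == ' ' || c == '	') = true
    · simp [List.dropWhile_cons, List.takeWhile_cons, h, Nat.succ_sub (by
        simpa using List.length_dropWhile_le (fun c => c == ' ' || c == '	') t)] at *
      exact ih
    · simp [List.dropWhile_cons, List.takeWhile_cons, h]

theorem pvCp2_comm (a b : List Char) : pvCp2 a b = pvCp2 b a := by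
  induction a generalizing b with
  | nil => cases b <;> rfl
  | cons x xs ih =>
    cases b with
    | nil => rfl
    | cons y ys =>
      by_cases h : x = y
      · subst h; simp [pvCp2, ih]
      · simp [pvCp2, h, Ne.symm h]

theorem pvCp2_prefix_left (a b : List Char) : pvCp2 a b <+: a := by
  induction a generalizing b with
  | nil => cases b <;> simp [pvCp2]
  | cons x xs ih =>
    cases b with
    | nil => simp [pvCp2]
    | cons y ys =>
      by_cases h : x = y
      · simpa [pvCp2, h] using ih ys
      · simp [pvCp2, h]

theorem pvCp2_prefix_right (a b : List Char) : pvCp2 a b <+: b :=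
  pvCp2_comm a b ▸ pvCp2_prefix_left b a

theorem prefix_pvCp2 (p a b : List Char) (ha : p <+: a) (hb : p <+: b) : p <+: pvCp2 a b := by
  induction p generalizing a b with
  | nil => simp
  | cons x xs ih =>
    obtain ⟨ta, rfl⟩ := ha
    obtain ⟨tb, hb'⟩ := hb
    cases b with
    | nil => simp at hb'
    | cons y ys =>
      simp at hb'
      obtain ⟨rfl, hys⟩ := hb'
      simp [pvCp2]
      exact ih _ _ (by simp) ⟨tb, hys⟩

theorem pvConsLeElim (c d : Char) (a b : List Char) (h : c :: a ≤ d :: b) :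
    c < d ∨ (c = d ∧ a ≤ b) := by
  rcases Std.le_iff_lt_or_eq.mp h with hlt | heq
  · rw [List.cons_lt_cons_iff] at hlt
    rcases hlt with hcd | ⟨hcd, hab⟩
    · exact Or.inl hcd
    · exact Or.inr ⟨hcd, le_of_lt hab⟩
  · injection heq with h1 h2
    exact Or.inr ⟨h1, le_of_eq h2⟩

-- the key order fact: the common prefix of the lexicographic endpoints is a prefix
-- of everything in between
theorem pvCp2_prefix_of_between (a x b : List Char) (h1 : a ≤ x) (h2 : x ≤ b) :
    pvCp2 a b <+: x := by
  induction a generalizing x b with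
  | nil => cases b <;> simp [pvCp2]
  | cons c a' ih =>
    cases b with
    | nil => simp [pvCp2]
    | cons d b' =>
      cases x with
      | nil =>
        rcases Std.le_iff_lt_or_eq.mp h1 with h | h
        · exact absurd h (List.not_lt_nil _)
        · simp at h
      | cons e x' =>
        by_cases h : c = d
        · subst h
          rcases pvConsLeElim _ _ _ _ h1 with hce | ⟨rfl, hax⟩
          · rcases pvConsLeElim _ _ _ _ h2 with hec | ⟨rfl, hxb⟩
            · exact absurd (lt_trans hce hec) (lt_irrefl _)
            · exact absurd hce (lt_irrefl _)
          · rcases pvConsLeElim _ _ _ _ h2 with hec | ⟨heq, hxb⟩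
            · exact absurd hec (lt_irrefl _)
            ·
              simp only [pvCp2, if_pos, List.cons_prefix_cons]
              exact ⟨trivial, ih x' b' hax hxb⟩
        · simp [pvCp2, h]

-- A's step equals B's two-string common prefix
theorem step_eq_pvCp2 (a b : List Char) : a.take (pvCommonLen a b) = pvCp2 a b := by
  induction a generalizing b with
  | nil => cases b <;> rfl
  | cons x xs ih =>
    cases b with
    | nil => rfl
    | cons y ys =>
      by_cases h : x = y
      · simp [pvCommonLen, pvCp2, h, ih]
      · simp [pvCommonLen, pvCp2, h]

-- A's loop with its break equals the plain fold of pvCp2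
theorem foldl_pvCp2_nil (l : List (List Char)) : l.foldl pvCp2 [] = [] := by
  induction l with
  | nil => rfl
  | cons y l ih => simpa [pvCp2] using ih

theorem pvLoopA_eq_foldl (l : List (List Char)) (a : List Char) :
    pvLoopA a l = l.foldl pvCp2 a := by
  induction l generalizing a with
  | nil => rfl
  | cons item rest ih =>
    show (if a.take (pvCommonLen a item) = [] then a.take (pvCommonLen a item)
          else pvLoopA (a.take (pvCommonLen a item)) rest) = _
    rw [step_eq_pvCp2]
    by_cases h : pvCp2 a item = []
    · simp [List.foldl_cons, h, foldl_pvCp2_nil]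
    · simp [List.foldl_cons, h, ih]

theorem foldl_pvCp2_prefix_acc (l : List (List Char)) (a : List Char) :
    l.foldl pvCp2 a <+: a := by
  induction l generalizing a with
  | nil => simp
  | cons y l ih => exact (ih (pvCp2 a y)).trans (pvCp2_prefix_left a y)

theorem foldl_pvCp2_prefix_mem (l : List (List Char)) (a y : List Char) (hy : y ∈ l) :
    l.foldl pvCp2 a <+: y := by
  induction l generalizing a with
  | nil => simp at hy
  | cons z l ih =>
    rcases List.mem_cons.mp hy with rfl | hy
    · exact (foldl_pvCp2_prefix_acc l (pvCp2 a y)).trans (pvCp2_prefix_right a y)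
    · exact ih (pvCp2 a z) hy

theorem prefix_foldl_pvCp2 (l : List (List Char)) (p a : List Char)
    (ha : p <+: a) (hl : ∀ y ∈ l, p <+: y) : p <+: l.foldl pvCp2 a := by
  induction l generalizing a with
  | nil => simpa using ha
  | cons z l ih =>
    exact ih (pvCp2 a z) (prefix_pvCp2 p a z ha (hl z List.mem_cons_self))
      (fun y hy => hl y (List.mem_cons_of_mem _ hy))

theorem common_indent_main (lines : List String) :
    common_indent_py lines = common_indent_py_alt lines := by
  unfold common_indent_py common_indent_py_alt
  simp only [pvLeadWS_eq]
  cases hc : (lines.filter (fun l => !(PySem.Chars.strip l.toList == []))).map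
      (fun l => pvTakeWS l.toList) with
  | nil => rfl
  | cons ind0 rest =>
    obtain ⟨lo, hlo⟩ : ∃ lo, PySem.List.min? (ind0 :: rest) (fun x => x) = some lo := by
      cases h : PySem.List.min? (ind0 :: rest) (fun x => x) with
      | none => exact absurd ((PySem.List.min?_eq_none_iff _ _).mp h) (by simp)
      | some lo => exact ⟨lo, rfl⟩
    obtain ⟨hi, hhi⟩ : ∃ hi, PySem.List.max? (ind0 :: rest) (fun x => x) = some hi := by
      cases h : PySem.List.max? (ind0 :: rest) (fun x => x) with
      | none => exact absurd ((PySem.List.max?_eq_none_iff _ _).mp h) (by simp)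
      | some hi => exact ⟨hi, rfl⟩
    rw [hlo, hhi]
    show String.mk (pvLoopA ind0 rest) = String.mk (pvCp2 lo hi)
    rw [pvLoopA_eq_foldl]
    congr 1
    have hinst : (fun (a b : List Char) => a.decidableLT b) = (LinearOrder.toDecidableLT (α := List Char)) := by
      funext a b; exact Subsingleton.elim _ _
    have hmemlo : lo ∈ ind0 :: rest := PySem.List.min?_mem hlo
    have hmemhi : hi ∈ ind0 :: rest := PySem.List.max?_mem hhi
    rw [hinst] at hlo hhi
    have hmin : ∀ y ∈ ind0 :: rest, lo ≤ y := by
      simpa using PySem.List.min?_isMin (κ := List Char) (xs := ind0 :: rest) (key := fun x => x) (m := lo) hlo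
    have hmax : ∀ y ∈ ind0 :: rest, y ≤ hi := by
      simpa using PySem.List.max?_isMax (κ := List Char) (xs := ind0 :: rest) (key := fun x => x) (m := hi) hhi
    have hFy : ∀ y ∈ ind0 :: rest, rest.foldl pvCp2 ind0 <+: y := by
      intro y hy
      rcases List.mem_cons.mp hy with rfl | hy
      · exact foldl_pvCp2_prefix_acc rest y
      · exact foldl_pvCp2_prefix_mem rest ind0 y hy
    have h1 : rest.foldl pvCp2 ind0 <+: pvCp2 lo hi :=
      prefix_pvCp2 _ _ _ (hFy lo hmemlo) (hFy hi hmemhi)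
    have hCy : ∀ y ∈ ind0 :: rest, pvCp2 lo hi <+: y := fun y hy =>
      pvCp2_prefix_of_between lo y hi (hmin y hy) (hmax y hy)
    have h2 : pvCp2 lo hi <+: rest.foldl pvCp2 ind0 :=
      prefix_foldl_pvCp2 rest _ ind0 (hCy ind0 List.mem_cons_self)
        (fun y hy => hCy y (List.mem_cons_of_mem _ hy))
    exact h1.eq_of_length_le h2.length_le

-- ===== VERDICT (by name: the statement is the Claim_ definition above) =====
theorem common_indent_py_spec : Claim_equal_common_indent_py := by
  intro lines _
  unfold Spec_common_indent_py
  exact common_indent_main lines
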